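-- pv_equiv track=rewrite | github.com/ephrem-ketachew/data-structure-and-algorithms | maximize-y-sum.py | maxSumDistinctTriplet
-- ===== SOURCE A (Python) =====
-- from typing import List
--
-- def maxSumDistinctTriplet(x: List[int], y: List[int]) -> int:
--     first_max = [None, None, None]
--     second_max = [None, None, None]
--     third_max = [None, None, None]
--
--     for i in range(len(y)):
--         if first_max[0] is None or y[i] > first_max[0]:
--             first_max[0] = y[i]
--             first_max[1] = i
--             first_max[2] = x[i]
--
--     for i in range(len(y)):
--         if (second_max[0] is None and i != first_max[1] and x[i] != first_max[2]) or (second_max[0] is not None and y[i] >  second_max[0] and i != first_max[1] and x[i] != first_max[2]):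
--             second_max[0] = y[i]
--             second_max[1] = i
--             second_max[2] = x[i]
--
--     for i in range(len(y)):
--         if (third_max[0] is None and (second_max[0] is not None and i != first_max[1] and x[i] != first_max[2] and i != second_max[1] and x[i] != second_max[2])) or (second_max[0] is not None and third_max[0] is not None and y[i] >  third_max[0] and (i != first_max[1] and x[i] != first_max[2] and i != second_max[1] and x[i] != second_max[2])):
--             third_max[0] = y[i]
--             third_max[1] = i
--             third_max[2] = x[i]
--
--     if first_max[1] is not None and second_max[1] is not None and third_max[1] is not None:
--         return first_max[0] + second_max[0] + third_max[0]
--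
--     return -1
-- ===== SOURCE B (Python) =====
-- def maxSumDistinctTriplet(x, y):
--     best = {}
--     for i in range(len(y)):
--         xi = x[i]
--         yi = y[i]
--         if xi not in best or yi > best[xi]:
--             best[xi] = yi
--     if len(best) < 3:
--         return -1
--     vals = list(best.values())
--     m1 = max(vals)
--     vals.remove(m1)
--     m2 = max(vals)
--     vals.remove(m2)
--     m3 = max(vals)
--     return m1 + m2 + m3
-- ===== Notes on version B (the rewrite author's own statement) =====
-- stated objective: simpler
-- what changed: Replaces A's three full exclusion-scan passes (each re-filtering every index against the previously picked index/x-value pairs) with one group-by pass building a dict of the maximum y per x-value, followed by a top-3 selection over the per-x maxima; returns -1 when fewer than 3 distinct x-values exist.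
-- outside the precondition, e.g. on maxSumDistinctTriplet([0, -1, 8, 8], [4, 3, 48, 2, 1]): A returns 55, B raises IndexError
import Mathlib
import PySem

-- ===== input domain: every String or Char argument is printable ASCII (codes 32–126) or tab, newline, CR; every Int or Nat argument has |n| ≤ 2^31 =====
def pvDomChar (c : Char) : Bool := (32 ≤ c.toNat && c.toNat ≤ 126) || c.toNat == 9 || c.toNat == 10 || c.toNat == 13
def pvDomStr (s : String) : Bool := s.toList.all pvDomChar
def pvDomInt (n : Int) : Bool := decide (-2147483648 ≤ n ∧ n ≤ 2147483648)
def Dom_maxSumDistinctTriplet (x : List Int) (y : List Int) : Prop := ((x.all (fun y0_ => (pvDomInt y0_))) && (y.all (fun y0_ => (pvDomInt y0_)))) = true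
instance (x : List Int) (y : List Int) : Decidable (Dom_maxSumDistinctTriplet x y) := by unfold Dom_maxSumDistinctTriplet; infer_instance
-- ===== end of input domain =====

-- B replaces A's three exclusion-scan passes over range(len(y)) with one group-by-x pass
-- (a dict of the maximum y per x-value) followed by a top-3 selection over the per-x maxima.


-- ===== PORT A =====
-- Literal port of A: three passes over range(len(y)); state = Option (value, index, x-value)
-- (the three fields of each Python triple are set together, None ↔ none).
def maxSumDistinctTriplet (x : List Int) (y : List Int) : Int :=
  let n : Int := (y.length : Int)
  let fm := (PySem.List.pyRange 0 n).foldl (fun (fm : Option (Int × Int × Int)) i =>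
    let yi := PySem.List.pyGetD y i 0
    let cond := match fm with
      | none => true
      | some (v1, _, _) => decide (yi > v1)
    if cond then some (yi, i, PySem.List.pyGetD x i 0) else fm) none
  let sm := (PySem.List.pyRange 0 n).foldl (fun (sm : Option (Int × Int × Int)) i =>
    let yi := PySem.List.pyGetD y i 0
    let xi := PySem.List.pyGetD x i 0
    -- i != first_max[1] / x[i] != first_max[2]; a comparison against Python None is True
    let neq1 := (match fm with | none => true | some (_, i1, _) => decide (i ≠ i1)) &&
                (match fm with | none => true | some (_, _, k1) => decide (xi ≠ k1))
    let cond := match sm with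
      | none => neq1
      | some (v2, _, _) => decide (yi > v2) && neq1
    if cond then some (yi, i, xi) else sm) none
  let tm := (PySem.List.pyRange 0 n).foldl (fun (tm : Option (Int × Int × Int)) i =>
    let yi := PySem.List.pyGetD y i 0
    let xi := PySem.List.pyGetD x i 0
    let excl := (match fm with | none => true | some (_, i1, _) => decide (i ≠ i1)) &&
                (match fm with | none => true | some (_, _, k1) => decide (xi ≠ k1)) &&
                (match sm with | none => true | some (_, i2, _) => decide (i ≠ i2)) &&
                (match sm with | none => true | some (_, _, k2) => decide (xi ≠ k2))
    let cond := match tm with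
      | none => sm.isSome && excl
      | some (v3, _, _) => sm.isSome && decide (yi > v3) && excl
    if cond then some (yi, i, xi) else tm) none
  match fm, sm, tm with
  | some (v1, _, _), some (v2, _, _), some (v3, _, _) => v1 + v2 + v3
  | _, _, _ => -1

-- ===== PORT B =====
-- Literal port of Source B: dict of max y per x-value, then three max/remove selections.
def maxSumDistinctTriplet_alt (x : List Int) (y : List Int) : Int :=
  let best := (PySem.List.pyRange 0 (y.length : Int)).foldl (fun (d : PySem.Dict Int Int) i =>
    let xi := PySem.List.pyGetD x i 0
    let yi := PySem.List.pyGetD y i 0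
    if (match d.get? xi with | none => true | some m => decide (yi > m))
    then d.insert xi yi else d) PySem.Dict.empty
  if best.size < 3 then -1
  else
    let vals := best.values
    let m1 := (PySem.List.max? vals (fun v => v)).getD 0
    let vals := (PySem.List.remove? vals m1).getD []
    let m2 := (PySem.List.max? vals (fun v => v)).getD 0
    let vals := (PySem.List.remove? vals m2).getD []
    let m3 := (PySem.List.max? vals (fun v => v)).getD 0
    m1 + m2 + m3

-- ===== PRECONDITION & SPEC =====
-- Pre_ excludes len(x) < len(y): B always raises IndexError there (it reads x[i] at every i),
-- and A raises on such inputs too unless its lazy read pattern (x[i] is read only when y[i]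
-- improves the running maximum) happens to skip the out-of-range indices.
def Pre_maxSumDistinctTriplet (x : List Int) (y : List Int) : Prop := y.length ≤ x.length
instance (x : List Int) (y : List Int) : Decidable (Pre_maxSumDistinctTriplet x y) := by
  unfold Pre_maxSumDistinctTriplet; infer_instance

def pvWitness_maxSumDistinctTriplet : List Int × List Int := ([1, 2, 3, 1], [5, 6, 7, 9])

def Spec_maxSumDistinctTriplet (x : List Int) (y : List Int) (out : Int) : Prop := out = maxSumDistinctTriplet_alt x y
instance (x : List Int) (y : List Int) (out : Int) : Decidable (Spec_maxSumDistinctTriplet x y out) := by unfold Spec_maxSumDistinctTriplet; infer_instance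

-- ===== CLAIM (what is proved, stated in full; the proofs are below) =====
def Claim_equal_maxSumDistinctTriplet : Prop := ∀ (x : List Int) (y : List Int), Dom_maxSumDistinctTriplet x y → Pre_maxSumDistinctTriplet x y → Spec_maxSumDistinctTriplet x y (maxSumDistinctTriplet x y)

-- ===== LEMMAS AND PROOFS =====

theorem pyGetD_cons_pos {a : Int} (xh : Int) (xt : List Int) (h : 1 ≤ a) :
    PySem.List.pyGetD (xh :: xt) a 0 = PySem.List.pyGetD xt (a - 1) 0 := by
  rw [PySem.List.pyGetD_of_nonneg _ _ (by omega), PySem.List.pyGetD_of_nonneg _ _ (by omega)]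
  have : a.toNat = (a - 1).toNat + 1 := by omega
  rw [this]
  rfl

theorem foldl_range_zip {σ : Type} (f : σ → Int → Int → Int → σ) :
    ∀ (y x : List Int), y.length ≤ x.length → ∀ (a : Int), 0 ≤ a → ∀ (init : σ),
    (PySem.List.pyRange a (a + (y.length : Int))).foldl
      (fun s i => f s i (PySem.List.pyGetD x (i - a) 0) (PySem.List.pyGetD y (i - a) 0)) init
    = (PySem.List.enumerate (x.zip y) a).foldl (fun s e => f s e.1 e.2.1 e.2.2) init := by
  intro y
  induction y with
  | nil =>
    intro x h a ha init
    rw [PySem.List.pyRange_one_eq_nil (by simp)]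
    simp
  | cons yh yt ih =>
    intro x h a ha init
    match x with
    | [] => simp at h
    | xh :: xt =>
      have hlen : ((yh :: yt).length : Int) = (yt.length : Int) + 1 := by push_cast [List.length_cons]; ring
      rw [hlen]
      rw [PySem.List.pyRange_one_cons (by omega)]
      simp only [List.foldl_cons]
      rw [List.zip_cons_cons, PySem.List.enumerate_cons, List.foldl_cons]
      have hhead : f init a (PySem.List.pyGetD (xh :: xt) (a - a) 0) (PySem.List.pyGetD (yh :: yt) (a - a) 0)
          = f init a xh yh := by
        simp [PySem.List.pyGetD]
      rw [hhead]
      have hco : a + ((yt.length : Int) + 1) = (a + 1) + (yt.length : Int) := by ring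
      rw [hco]
      rw [PySem.List.foldl_congr_mem _ _
          (fun s i => f s i (PySem.List.pyGetD xt (i - (a+1)) 0) (PySem.List.pyGetD yt (i - (a+1)) 0)) _
          (by
            intro acc i hi
            rw [PySem.List.mem_pyRange_one] at hi
            rw [pyGetD_cons_pos _ _ (by omega), pyGetD_cons_pos _ _ (by omega)]
            have : i - a - 1 = i - (a + 1) := by ring
            rw [this])]
      exact ih xt (by simpa using h) (a + 1) (by omega) (f init a xh yh)

theorem foldl_range_zip0 {σ : Type} (f : σ → Int → Int → Int → σ)
    (x y : List Int) (h : y.length ≤ x.length) (init : σ) :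
    (PySem.List.pyRange 0 (y.length : Int)).foldl
      (fun s i => f s i (PySem.List.pyGetD x i 0) (PySem.List.pyGetD y i 0)) init
    = (PySem.List.enumerate (x.zip y) 0).foldl (fun s e => f s e.1 e.2.1 e.2.2) init := by
  have := foldl_range_zip f y x h 0 le_rfl init
  rw [zero_add] at this
  rw [← this]
  apply PySem.List.foldl_congr_mem
  intro acc i _
  rw [show i - 0 = i from by ring]

def scanStep (P : Int → Bool) (s : Option (Int × Int)) (q : Int × Int) : Option (Int × Int) :=
  if (match s with | none => P q.1 | some (v, _) => decide (q.2 > v) && P q.1)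
  then some (q.2, q.1) else s

def triStep (P : Int → Bool) (t : Option (Int × Int × Int)) (e : Int × (Int × Int)) :
    Option (Int × Int × Int) :=
  if (match t with | none => P e.2.1 | some (v, _, _) => decide (e.2.2 > v) && P e.2.1)
  then some (e.2.2, e.1, e.2.1) else t

def projTri (t : Option (Int × Int × Int)) : Option (Int × Int) :=
  t.map (fun t => (t.1, t.2.2))

theorem scanStep_none (P : Int → Bool) (q : Int × Int) :
    scanStep P none q = if P q.1 then some (q.2, q.1) else none := rfl

theorem scanStep_some (P : Int → Bool) (v k : Int) (q : Int × Int) :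
    scanStep P (some (v, k)) q
      = if (decide (q.2 > v) && P q.1) then some (q.2, q.1) else some (v, k) := rfl

theorem triStep_none (P : Int → Bool) (e : Int × (Int × Int)) :
    triStep P none e = if P e.2.1 then some (e.2.2, e.1, e.2.1) else none := rfl

theorem triStep_some (P : Int → Bool) (v i k : Int) (e : Int × (Int × Int)) :
    triStep P (some (v, i, k)) e
      = if (decide (e.2.2 > v) && P e.2.1) then some (e.2.2, e.1, e.2.1) else some (v, i, k) := rfl

theorem scan_none_iff (P : Int → Bool) :
    ∀ (p : List (Int × Int)) (acc : Option (Int × Int)),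
    p.foldl (scanStep P) acc = none ↔ acc = none ∧ ∀ q ∈ p, P q.1 = false := by
  intro p
  induction p with
  | nil => intro acc; simp
  | cons q t ih =>
    intro acc
    simp only [List.foldl_cons, ih (scanStep P acc q), List.mem_cons]
    cases acc with
    | none =>
      rw [scanStep_none]
      by_cases hP : P q.1 = true
      · simp [hP]
      · rw [if_neg hP]
        simp only [Bool.not_eq_true] at hP
        constructor
        · rintro ⟨-, h2⟩
          refine ⟨rfl, ?_⟩
          intro q' hq'
          rcases hq' with rfl | hq'
          · exact hP
          · exact h2 q' hq'
        · rintro ⟨-, h2⟩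
          exact ⟨rfl, fun q' hq' => h2 q' (Or.inr hq')⟩
    | some s =>
      obtain ⟨v0, k0⟩ := s
      rw [scanStep_some]
      split <;> simp

theorem scan_mem (P : Int → Bool) :
    ∀ (p : List (Int × Int)) (acc : Option (Int × Int)) (v k : Int),
    p.foldl (scanStep P) acc = some (v, k) →
    acc = some (v, k) ∨ ((k, v) ∈ p ∧ P k = true) := by
  intro p
  induction p with
  | nil => intro acc v k h; simp at h; exact Or.inl (by simp [h])
  | cons q t ih =>
    intro acc v k h
    simp only [List.foldl_cons] at h
    rcases ih _ v k h with h1 | h1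
    · cases acc with
      | none =>
        rw [scanStep_none] at h1
        split at h1
        · rename_i hP
          simp at h1
          obtain ⟨rfl, rfl⟩ := h1
          exact Or.inr ⟨by simp, hP⟩
        · simp at h1
      | some s =>
        obtain ⟨v0, k0⟩ := s
        rw [scanStep_some] at h1
        split at h1
        · rename_i hP
          simp at h1 hP
          obtain ⟨rfl, rfl⟩ := h1
          exact Or.inr ⟨by simp, hP.2⟩
        · exact Or.inl h1
    · exact Or.inr ⟨List.mem_cons_of_mem _ h1.1, h1.2⟩

theorem scan_max (P : Int → Bool) :
    ∀ (p : List (Int × Int)) (acc : Option (Int × Int)) (v k : Int),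
    p.foldl (scanStep P) acc = some (v, k) →
    (∀ q ∈ p, P q.1 = true → q.2 ≤ v) ∧ (∀ v0 k0, acc = some (v0, k0) → v0 ≤ v) := by
  intro p
  induction p with
  | nil =>
    intro acc v k h; simp at h
    exact ⟨by simp, by intro v0 k0 h0; rw [h0] at h; simp at h; omega⟩
  | cons q t ih =>
    intro acc v k h
    simp only [List.foldl_cons] at h
    obtain ⟨hall, hacc⟩ := ih _ v k h
    cases acc with
    | none =>
      rw [scanStep_none] at hacc
      refine ⟨?_, by simp⟩
      intro q' hq' hP
      rcases List.mem_cons.mp hq' with rfl | hq'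
      · have := hacc q'.2 q'.1 (by rw [if_pos hP])
        omega
      · exact hall q' hq' hP
    | some s =>
      obtain ⟨v0, k0⟩ := s
      rw [scanStep_some] at hacc
      by_cases hcond : (decide (q.2 > v0) && P q.1) = true
      · rw [if_pos hcond] at hacc
        have hq : q.2 ≤ v := hacc q.2 q.1 rfl
        simp only [Bool.and_eq_true, decide_eq_true_eq] at hcond
        refine ⟨?_, ?_⟩
        · intro q' hq' hP
          rcases List.mem_cons.mp hq' with rfl | hq'
          · exact hq
          · exact hall q' hq' hP
        · intro v1 k1 h1
          simp only [Option.some.injEq, Prod.mk.injEq] at h1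
          omega
      · rw [if_neg hcond] at hacc
        have hv0 : v0 ≤ v := hacc v0 k0 rfl
        refine ⟨?_, ?_⟩
        · intro q' hq' hP
          rcases List.mem_cons.mp hq' with rfl | hq'
          · simp [hP] at hcond
            omega
          · exact hall q' hq' hP
        · intro v1 k1 h1
          simp only [Option.some.injEq, Prod.mk.injEq] at h1
          omega

theorem tri_mem (P : Int → Bool) :
    ∀ (l : List (Int × (Int × Int))) (acc : Option (Int × Int × Int)) (v i k : Int),
    l.foldl (triStep P) acc = some (v, i, k) →
    acc = some (v, i, k) ∨ (i, (k, v)) ∈ l := by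
  intro l
  induction l with
  | nil => intro acc v i k h; simp at h; exact Or.inl (by simp [h])
  | cons e t ih =>
    intro acc v i k h
    simp only [List.foldl_cons] at h
    rcases ih _ v i k h with h1 | h1
    · cases acc with
      | none =>
        rw [triStep_none] at h1
        split at h1
        · simp at h1
          obtain ⟨rfl, rfl, rfl⟩ := h1
          exact Or.inr (by simp)
        · simp at h1
      | some s =>
        obtain ⟨v0, i0, k0⟩ := s
        rw [triStep_some] at h1
        split at h1
        · simp at h1
          obtain ⟨rfl, rfl, rfl⟩ := h1
          exact Or.inr (by simp)
        · exact Or.inl h1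
    · exact Or.inr (List.mem_cons_of_mem _ h1)

theorem tri_proj (P : Int → Bool) :
    ∀ (l : List (Int × (Int × Int))) (acc : Option (Int × Int × Int)),
    projTri (l.foldl (triStep P) acc)
      = (l.map (·.2)).foldl (scanStep P) (projTri acc) := by
  intro l
  induction l with
  | nil => intro acc; simp
  | cons e t ih =>
    intro acc
    simp only [List.foldl_cons, List.map_cons, ih]
    congr 1
    cases acc with
    | none =>
      rw [triStep_none]
      show _ = scanStep P none e.2
      rw [scanStep_none]
      split <;> simp [projTri]
    | some s =>
      obtain ⟨v, i, k⟩ := s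
      rw [triStep_some]
      show _ = scanStep P (some (v, k)) e.2
      rw [scanStep_some]
      split <;> simp [projTri]

def dStep (d : PySem.Dict Int Int) (q : Int × Int) : PySem.Dict Int Int :=
  if (match d.get? q.1 with | none => true | some m => decide (q.2 > m))
  then d.insert q.1 q.2 else d
theorem dict_get (k : Int) :
    ∀ (p : List (Int × Int)) (d : PySem.Dict Int Int),
    (p.foldl dStep d).get? k
      = (p.foldl (scanStep (fun a => decide (a = k))) ((d.get? k).map (fun v => (v, k)))).map (·.1) := by
  intro p
  induction p with
  | nil =>
    intro d
    simp only [List.foldl_nil]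
    cases d.get? k <;> simp
  | cons q t ih =>
    intro d
    simp only [List.foldl_cons, ih]
    congr 2
    by_cases hk : q.1 = k
    · subst hk
      cases hd : d.get? q.1 with
      | none =>
        rw [dStep, hd]
        simp only [if_pos]
        rw [PySem.Dict.get?_insert_self]
        simp [scanStep.eq_def]
      | some m =>
        rw [dStep, hd]
        by_cases hm : q.2 > m
        · rw [if_pos (by simp [hm])]
          rw [PySem.Dict.get?_insert_self]
          simp [scanStep.eq_def, hm]
        · rw [if_neg (by simp [hm]), hd]
          simp [scanStep.eq_def, hm]
    · have hget : (dStep d q).get? k = d.get? k := by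
        rw [dStep]
        split
        · exact PySem.Dict.get?_insert_of_ne d q.2 (fun h => hk h.symm)
        · split
          · exact PySem.Dict.get?_insert_of_ne d q.2 (fun h => hk h.symm)
          · rfl
      rw [hget]
      have hfalse : (decide (q.1 = k)) = false := by simp [hk]
      cases hd : d.get? k <;> simp [scanStep.eq_def, hfalse]

theorem dict_nodup :
    ∀ (p : List (Int × Int)) (d : PySem.Dict Int Int),
    d.keys.Nodup → (p.foldl dStep d).keys.Nodup := by
  intro p
  induction p with
  | nil => intro d h; simpa using h
  | cons q t ih =>
    intro d h
    simp only [List.foldl_cons]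
    apply ih
    rw [dStep]
    split
    · exact PySem.Dict.nodup_keys_insert d _ _ h
    · split
      · exact PySem.Dict.nodup_keys_insert d _ _ h
      · exact h

-- ===== VERDICT (by name: the statement is the Claim_ definition above) =====
-- passes of A, named (definitionally equal pieces of the port)
def pass1 (x y : List Int) : Option (Int × Int × Int) :=
  (PySem.List.pyRange 0 (y.length : Int)).foldl (fun fm i =>
    if (match fm with
        | none => true
        | some (v1, _, _) => decide (PySem.List.pyGetD y i 0 > v1))
    then some (PySem.List.pyGetD y i 0, i, PySem.List.pyGetD x i 0) else fm) none

def pass2 (x y : List Int) (fm : Option (Int × Int × Int)) : Option (Int × Int × Int) :=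
  (PySem.List.pyRange 0 (y.length : Int)).foldl (fun sm i =>
    if (match sm with
        | none =>
          (match fm with | none => true | some (_, i1, _) => decide (i ≠ i1)) &&
          (match fm with | none => true | some (_, _, k1) => decide (PySem.List.pyGetD x i 0 ≠ k1))
        | some (v2, _, _) =>
          decide (PySem.List.pyGetD y i 0 > v2) &&
          ((match fm with | none => true | some (_, i1, _) => decide (i ≠ i1)) &&
           (match fm with | none => true | some (_, _, k1) => decide (PySem.List.pyGetD x i 0 ≠ k1))))
    then some (PySem.List.pyGetD y i 0, i, PySem.List.pyGetD x i 0) else sm) none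

def pass3 (x y : List Int) (fm sm : Option (Int × Int × Int)) : Option (Int × Int × Int) :=
  (PySem.List.pyRange 0 (y.length : Int)).foldl (fun tm i =>
    if (match tm with
        | none =>
          sm.isSome &&
          ((match fm with | none => true | some (_, i1, _) => decide (i ≠ i1)) &&
           (match fm with | none => true | some (_, _, k1) => decide (PySem.List.pyGetD x i 0 ≠ k1)) &&
           (match sm with | none => true | some (_, i2, _) => decide (i ≠ i2)) &&
           (match sm with | none => true | some (_, _, k2) => decide (PySem.List.pyGetD x i 0 ≠ k2)))
        | some (v3, _, _) =>
          sm.isSome && decide (PySem.List.pyGetD y i 0 > v3) &&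
          ((match fm with | none => true | some (_, i1, _) => decide (i ≠ i1)) &&
           (match fm with | none => true | some (_, _, k1) => decide (PySem.List.pyGetD x i 0 ≠ k1)) &&
           (match sm with | none => true | some (_, i2, _) => decide (i ≠ i2)) &&
           (match sm with | none => true | some (_, _, k2) => decide (PySem.List.pyGetD x i 0 ≠ k2))))
    then some (PySem.List.pyGetD y i 0, i, PySem.List.pyGetD x i 0) else tm) none

def bestD (x y : List Int) : PySem.Dict Int Int :=
  (PySem.List.pyRange 0 (y.length : Int)).foldl (fun d i =>
    if (match d.get? (PySem.List.pyGetD x i 0) with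
        | none => true
        | some m => decide (PySem.List.pyGetD y i 0 > m))
    then d.insert (PySem.List.pyGetD x i 0) (PySem.List.pyGetD y i 0) else d) PySem.Dict.empty

theorem A_unfold (x y : List Int) :
    maxSumDistinctTriplet x y
      = match pass1 x y, pass2 x y (pass1 x y), pass3 x y (pass1 x y) (pass2 x y (pass1 x y)) with
        | some (v1, _, _), some (v2, _, _), some (v3, _, _) => v1 + v2 + v3
        | _, _, _ => -1 := rfl

theorem B_unfold (x y : List Int) :
    maxSumDistinctTriplet_alt x y
      = if (bestD x y).size < 3 then -1
        else
          let vals := (bestD x y).values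
          let m1 := (PySem.List.max? vals (fun v => v)).getD 0
          let vals := (PySem.List.remove? vals m1).getD []
          let m2 := (PySem.List.max? vals (fun v => v)).getD 0
          let vals := (PySem.List.remove? vals m2).getD []
          let m3 := (PySem.List.max? vals (fun v => v)).getD 0
          m1 + m2 + m3 := rfl

theorem pass1_eq (x y : List Int) (hpre : y.length ≤ x.length) :
    pass1 x y = (PySem.List.enumerate (x.zip y) 0).foldl (triStep (fun _ => true)) none := by
  have h0 := foldl_range_zip0 (σ := Option (Int × Int × Int)) (fun s i xi yi =>
            if (match s with | none => true | some (v1, _, _) => decide (yi > v1))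
            then some (yi, i, xi) else s) x y hpre none
  have h : pass1 x y
      = (PySem.List.enumerate (x.zip y) 0).foldl
          (fun s e => (fun (s : Option (Int × Int × Int)) (i xi yi : Int) =>
            if (match s with | none => true | some (v1, _, _) => decide (yi > v1))
            then some (yi, i, xi) else s) s e.1 e.2.1 e.2.2) none := h0
  rw [h]
  apply PySem.List.foldl_congr_mem
  intro acc e _
  cases acc with
  | none => rfl
  | some s => obtain ⟨v, i, k⟩ := s; simp [triStep]

theorem pass2_eq (x y : List Int) (hpre : y.length ≤ x.length) (v1 i1 k1 : Int)
    (hmem : (i1, (k1, v1)) ∈ PySem.List.enumerate (x.zip y) 0) :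
    pass2 x y (some (v1, i1, k1))
      = (PySem.List.enumerate (x.zip y) 0).foldl (triStep (fun a => decide (a ≠ k1))) none := by
  have h0 := foldl_range_zip0 (σ := Option (Int × Int × Int)) (fun s i xi yi =>
            if (match s with
                | none => decide (i ≠ i1) && decide (xi ≠ k1)
                | some (v2, _, _) => decide (yi > v2) && (decide (i ≠ i1) && decide (xi ≠ k1)))
            then some (yi, i, xi) else s) x y hpre none
  have h : pass2 x y (some (v1, i1, k1))
      = (PySem.List.enumerate (x.zip y) 0).foldl
          (fun s e => (fun (s : Option (Int × Int × Int)) (i xi yi : Int) =>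
            if (match s with
                | none => decide (i ≠ i1) && decide (xi ≠ k1)
                | some (v2, _, _) => decide (yi > v2) && (decide (i ≠ i1) && decide (xi ≠ k1)))
            then some (yi, i, xi) else s) s e.1 e.2.1 e.2.2) none := h0
  rw [h]
  apply PySem.List.foldl_congr_mem
  intro acc e he
  have hnd : ((PySem.List.enumerate (x.zip y) 0).map (·.1)).Nodup := by
    rw [PySem.List.map_fst_enumerate]
    exact PySem.List.nodup_pyRange_one _ _
  have hidx : (decide (e.1 ≠ i1) && decide (e.2.1 ≠ k1)) = decide (e.2.1 ≠ k1) := by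
    by_cases hxk : e.2.1 = k1
    · simp [hxk]
    · have hne : e.1 ≠ i1 := by
        intro hi
        have := List.inj_on_of_nodup_map hnd he hmem hi
        rw [this] at hxk
        exact hxk rfl
      simp [hne, hxk]
  cases acc with
  | none =>
    show (if (decide (e.1 ≠ i1) && decide (e.2.1 ≠ k1)) then _ else _) = triStep _ none e
    rw [hidx, triStep_none]
  | some s =>
    obtain ⟨v, i, k⟩ := s
    show (if (decide (e.2.2 > v) && (decide (e.1 ≠ i1) && decide (e.2.1 ≠ k1))) then _ else _) = _
    rw [hidx, triStep_some]

theorem pass3_none (x y : List Int) (fm : Option (Int × Int × Int)) :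
    pass3 x y fm none = none := by
  unfold pass3
  generalize (PySem.List.pyRange 0 ((y.length : Int))) = l
  induction l with
  | nil => rfl
  | cons a t ih => simpa using ih

theorem pass3_eq (x y : List Int) (hpre : y.length ≤ x.length) (v1 i1 k1 v2 i2 k2 : Int)
    (hmem1 : (i1, (k1, v1)) ∈ PySem.List.enumerate (x.zip y) 0)
    (hmem2 : (i2, (k2, v2)) ∈ PySem.List.enumerate (x.zip y) 0) :
    pass3 x y (some (v1, i1, k1)) (some (v2, i2, k2))
      = (PySem.List.enumerate (x.zip y) 0).foldl
          (triStep (fun a => decide (a ≠ k1) && decide (a ≠ k2))) none := by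
  have h0 := foldl_range_zip0 (σ := Option (Int × Int × Int)) (fun s i xi yi =>
      if (match s with
          | none => decide (i ≠ i1) && decide (xi ≠ k1) && decide (i ≠ i2) && decide (xi ≠ k2)
          | some (v3, _, _) => decide (yi > v3) &&
              (decide (i ≠ i1) && decide (xi ≠ k1) && decide (i ≠ i2) && decide (xi ≠ k2)))
      then some (yi, i, xi) else s) x y hpre none
  have h : pass3 x y (some (v1, i1, k1)) (some (v2, i2, k2))
      = (PySem.List.enumerate (x.zip y) 0).foldl
          (fun s e => (fun (s : Option (Int × Int × Int)) (i xi yi : Int) =>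
            if (match s with
                | none => decide (i ≠ i1) && decide (xi ≠ k1) && decide (i ≠ i2) && decide (xi ≠ k2)
                | some (v3, _, _) => decide (yi > v3) &&
                    (decide (i ≠ i1) && decide (xi ≠ k1) && decide (i ≠ i2) && decide (xi ≠ k2)))
            then some (yi, i, xi) else s) s e.1 e.2.1 e.2.2) none := h0
  rw [h]
  apply PySem.List.foldl_congr_mem
  intro acc e he
  have hnd : ((PySem.List.enumerate (x.zip y) 0).map (·.1)).Nodup := by
    rw [PySem.List.map_fst_enumerate]
    exact PySem.List.nodup_pyRange_one _ _
  have hne1 : e.2.1 ≠ k1 → e.1 ≠ i1 := by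
    intro hxk hi
    have := List.inj_on_of_nodup_map hnd he hmem1 hi
    rw [this] at hxk
    exact hxk rfl
  have hne2 : e.2.1 ≠ k2 → e.1 ≠ i2 := by
    intro hxk hi
    have := List.inj_on_of_nodup_map hnd he hmem2 hi
    rw [this] at hxk
    exact hxk rfl
  have hexcl : (decide (e.1 ≠ i1) && decide (e.2.1 ≠ k1) && decide (e.1 ≠ i2) && decide (e.2.1 ≠ k2))
      = (decide (e.2.1 ≠ k1) && decide (e.2.1 ≠ k2)) := by
    by_cases h1 : e.2.1 = k1
    · simp [h1]
    · by_cases h2 : e.2.1 = k2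
      · simp [h2, hne1 h1]
      · simp [h1, h2, hne1 h1, hne2 h2]
  cases acc with
  | none =>
    show (if (decide (e.1 ≠ i1) && decide (e.2.1 ≠ k1) && decide (e.1 ≠ i2) && decide (e.2.1 ≠ k2)) then _ else _) = triStep _ none e
    rw [hexcl, triStep_none]
  | some s =>
    obtain ⟨v, i, k⟩ := s
    show (if (decide (e.2.2 > v) && (decide (e.1 ≠ i1) && decide (e.2.1 ≠ k1) && decide (e.1 ≠ i2) && decide (e.2.1 ≠ k2))) then _ else _) = _
    rw [hexcl, triStep_some]

theorem bestD_eq (x y : List Int) (hpre : y.length ≤ x.length) :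
    bestD x y = (x.zip y).foldl dStep PySem.Dict.empty := by
  have h0 := foldl_range_zip0 (σ := PySem.Dict Int Int) (fun d i xi yi =>
      if (match d.get? xi with | none => true | some m => decide (yi > m))
      then d.insert xi yi else d) x y hpre PySem.Dict.empty
  have h : bestD x y
      = (PySem.List.enumerate (x.zip y) 0).foldl (fun s e => dStep s e.2) PySem.Dict.empty := h0
  rw [h]
  conv_rhs => rw [← PySem.List.map_snd_enumerate (x.zip y) 0]
  rw [List.foldl_map]

theorem D_get (p : List (Int × Int)) (k : Int) :
    (p.foldl dStep PySem.Dict.empty).get? k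
      = (p.foldl (scanStep (fun a => decide (a = k))) none).map (·.1) := by
  have h := dict_get k p PySem.Dict.empty
  rwa [PySem.Dict.get?_empty] at h

theorem D_nodup (p : List (Int × Int)) : (p.foldl dStep PySem.Dict.empty).keys.Nodup :=
  dict_nodup p PySem.Dict.empty PySem.Dict.nodup_keys_empty

theorem D_get_mem (p : List (Int × Int)) (k v : Int)
    (h : (p.foldl dStep PySem.Dict.empty).get? k = some v) :
    (k, v) ∈ p ∧ ∀ q ∈ p, q.1 = k → q.2 ≤ v := by
  rw [D_get] at h
  rcases Option.map_eq_some_iff.mp h with ⟨⟨v', k'⟩, hscan, hv⟩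
  simp at hv
  subst hv
  rcases scan_mem _ _ _ _ _ hscan with h1 | h1
  · simp at h1
  · obtain ⟨hmem, hk⟩ := h1
    simp at hk
    subst hk
    refine ⟨hmem, ?_⟩
    intro q hq hqk
    exact (scan_max _ _ _ _ _ hscan).1 q hq (by simp [hqk])

theorem D_none_iff (p : List (Int × Int)) (k : Int) :
    (p.foldl dStep PySem.Dict.empty).get? k = none ↔ ∀ q ∈ p, q.1 ≠ k := by
  rw [D_get]
  rw [Option.map_eq_none_iff, scan_none_iff]
  simp

theorem D_some_of (p : List (Int × Int)) (k v : Int) (hq : (k, v) ∈ p) :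
    ∃ g, (p.foldl dStep PySem.Dict.empty).get? k = some g ∧ v ≤ g := by
  cases hg : (p.foldl dStep PySem.Dict.empty).get? k with
  | none =>
    rw [D_none_iff] at hg
    exact absurd rfl (hg (k, v) hq)
  | some g =>
    exact ⟨g, rfl, (D_get_mem p k g hg).2 (k, v) hq rfl⟩

theorem size_eq_keys_length (d : PySem.Dict Int Int) : d.size = d.keys.length := by
  cases d
  simp [PySem.Dict.size, PySem.Dict.keys]

theorem D_mem_values (p : List (Int × Int)) (v : Int) :
    v ∈ (p.foldl dStep PySem.Dict.empty).values
      ↔ ∃ k, (p.foldl dStep PySem.Dict.empty).get? k = some v := by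
  have hval : (p.foldl dStep PySem.Dict.empty).values
      = (p.foldl dStep PySem.Dict.empty).items.map (·.2) := by
    cases (p.foldl dStep PySem.Dict.empty)
    rfl
  constructor
  · intro hv
    rw [hval, List.mem_map] at hv
    obtain ⟨⟨k, v'⟩, hq, hv'⟩ := hv
    cases hv'
    exact ⟨k, PySem.Dict.get?_of_mem_items _ hq (D_nodup p)⟩
  · rintro ⟨k, hk⟩
    rw [hval, List.mem_map]
    exact ⟨(k, v), (PySem.Dict.get?_eq_some_iff_mem_items _ k v (D_nodup p)).mp hk, rfl⟩

theorem D_mem_keys (p : List (Int × Int)) (k : Int) :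
    k ∈ (p.foldl dStep PySem.Dict.empty).keys ↔ ∃ q ∈ p, q.1 = k := by
  constructor
  · intro hk
    by_contra hno
    have hno' : ∀ q ∈ p, q.1 ≠ k := by
      intro q hq hk'
      exact hno ⟨q, hq, hk'⟩
    have : (p.foldl dStep PySem.Dict.empty).get? k = none :=
      (D_none_iff p k).mpr hno' 
    rw [PySem.Dict.get?_eq_none_iff_not_mem_keys] at this
    exact this hk
  · rintro ⟨q, hq, rfl⟩
    obtain ⟨g, hg, -⟩ := D_some_of p q.1 q.2 (by simpa using hq)
    by_contra hk
    rw [← PySem.Dict.get?_eq_none_iff_not_mem_keys] at hk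
    rw [hk] at hg
    cases hg

theorem max_eq_of (vals : List Int) (v : Int) (hv : v ∈ vals) (hdom : ∀ w ∈ vals, w ≤ v) :
    PySem.List.max? vals (fun w => w) = some v := by
  cases hm : PySem.List.max? vals (fun w => w) with
  | none =>
    rw [PySem.List.max?_eq_none_iff] at hm
    rw [hm] at hv
    cases hv
  | some m =>
    have h1 : m ∈ vals := PySem.List.max?_mem hm
    have h2 := PySem.List.max?_isMax hm v hv
    rw [le_antisymm (hdom m h1) h2]

theorem get?_some_of_mem_keys (d : PySem.Dict Int Int) (k : Int) (hk : k ∈ d.keys) :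
    ∃ g, d.get? k = some g := by
  cases h : d.get? k with
  | some g => exact ⟨g, rfl⟩
  | none =>
    rw [PySem.Dict.get?_eq_none_iff_not_mem_keys] at h
    exact absurd hk h

-- ===== VERDICT (by name: the statement is the Claim_ definition above) =====
theorem maxSumDistinctTriplet_spec : Claim_equal_maxSumDistinctTriplet := by
  intro x y _ hpre
  unfold Spec_maxSumDistinctTriplet
  have hpre' : y.length ≤ x.length := hpre
  rw [A_unfold, B_unfold, bestD_eq x y hpre', pass1_eq x y hpre']
  set p := x.zip y with hp
  set E := PySem.List.enumerate p 0 with hE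
  set D := p.foldl dStep PySem.Dict.empty with hDdef
  have hsnd : E.map (·.2) = p := PySem.List.map_snd_enumerate _ _
  have hplen : p.length = y.length := by
    rw [hp, List.length_zip]
    omega
  cases hfm : E.foldl (triStep (fun _ => true)) none with
  | none =>
    have hproj := tri_proj (fun _ => true) E none
    rw [hfm, hsnd] at hproj
    have hscan1 : p.foldl (scanStep (fun _ => true)) none = none := by
      simpa [projTri] using hproj.symm
    have hpnil : p = [] := by
      rcases (scan_none_iff _ p none).mp hscan1 with ⟨-, hall⟩
      cases hq : p with
      | nil => rfl
      | cons q t =>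
        have := hall q (by rw [hq]; exact List.mem_cons_self)
        simp at this
    have hD : D = PySem.Dict.empty := by rw [hDdef, hpnil]; rfl
    have hB : (if D.size < 3 then (-1 : Int)
        else
          let vals := D.values
          let m1 := (PySem.List.max? vals (fun v => v)).getD 0
          let vals := (PySem.List.remove? vals m1).getD []
          let m2 := (PySem.List.max? vals (fun v => v)).getD 0
          let vals := (PySem.List.remove? vals m2).getD []
          let m3 := (PySem.List.max? vals (fun v => v)).getD 0
          m1 + m2 + m3) = -1 := by
      rw [if_pos (by rw [hD, PySem.Dict.size_empty]; omega)]
    rw [hB]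
  | some s1 =>
    obtain ⟨v1, i1, k1⟩ := s1
    have hmem1 : (i1, (k1, v1)) ∈ E := by
      rcases tri_mem _ E none v1 i1 k1 hfm with h | h
      · cases h
      · exact h
    have hproj1 := tri_proj (fun _ => true) E none
    rw [hfm, hsnd] at hproj1
    have hscan1 : p.foldl (scanStep (fun _ => true)) none = some (v1, k1) := by
      simpa [projTri] using hproj1.symm
    have hmem1p : (k1, v1) ∈ p := by
      rcases scan_mem _ p none v1 k1 hscan1 with h | h
      · cases h
      · exact h.1
    have hdom1 : ∀ q ∈ p, q.2 ≤ v1 := by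
      intro q hq
      exact (scan_max _ p none v1 k1 hscan1).1 q hq rfl
    rw [pass2_eq x y hpre' v1 i1 k1 hmem1]
    cases hsm : E.foldl (triStep (fun a => decide (a ≠ k1))) none with
    | none =>
      have hproj2 := tri_proj (fun a => decide (a ≠ k1)) E none
      rw [hsm, hsnd] at hproj2
      have hscan2 : p.foldl (scanStep (fun a => decide (a ≠ k1))) none = none := by
        simpa [projTri] using hproj2.symm
      have hall : ∀ q ∈ p, q.1 = k1 := by
        intro q hq
        have := ((scan_none_iff _ p none).mp hscan2).2 q hq
        simpa using this
      have hsub : D.keys ⊆ [k1] := by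
        intro k hk
        obtain ⟨q, hq, rfl⟩ := (D_mem_keys p k).mp hk
        simp [hall q hq]
      have hklen : D.keys.length ≤ 1 := by
        have := ((D_nodup p).subperm hsub).length_le
        simpa using this
      have hB : (if D.size < 3 then (-1 : Int)
          else
            let vals := D.values
            let m1 := (PySem.List.max? vals (fun v => v)).getD 0
            let vals := (PySem.List.remove? vals m1).getD []
            let m2 := (PySem.List.max? vals (fun v => v)).getD 0
            let vals := (PySem.List.remove? vals m2).getD []
            let m3 := (PySem.List.max? vals (fun v => v)).getD 0
            m1 + m2 + m3) = -1 := by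
        rw [if_pos (by rw [size_eq_keys_length]; omega)]
      rw [hB, pass3_none]
    | some s2 =>
      obtain ⟨v2, i2, k2⟩ := s2
      have hmem2 : (i2, (k2, v2)) ∈ E := by
        rcases tri_mem _ E none v2 i2 k2 hsm with h | h
        · cases h
        · exact h
      have hproj2 := tri_proj (fun a => decide (a ≠ k1)) E none
      rw [hsm, hsnd] at hproj2
      have hscan2 : p.foldl (scanStep (fun a => decide (a ≠ k1))) none = some (v2, k2) := by
        simpa [projTri] using hproj2.symm
      have hmem2p : (k2, v2) ∈ p ∧ k2 ≠ k1 := by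
        rcases scan_mem _ p none v2 k2 hscan2 with h | h
        · cases h
        · exact ⟨h.1, by simpa using h.2⟩
      have hdom2 : ∀ q ∈ p, q.1 ≠ k1 → q.2 ≤ v2 := by
        intro q hq hqk
        exact (scan_max _ p none v2 k2 hscan2).1 q hq (by simpa using hqk)
      rw [pass3_eq x y hpre' v1 i1 k1 v2 i2 k2 hmem1 hmem2]
      cases htm : E.foldl (triStep (fun a => decide (a ≠ k1) && decide (a ≠ k2))) none with
      | none =>
        have hproj3 := tri_proj (fun a => decide (a ≠ k1) && decide (a ≠ k2)) E none
        rw [htm, hsnd] at hproj3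
        have hscan3 : p.foldl (scanStep (fun a => decide (a ≠ k1) && decide (a ≠ k2))) none = none := by
          simpa [projTri] using hproj3.symm
        have hall : ∀ q ∈ p, q.1 = k1 ∨ q.1 = k2 := by
          intro q hq
          have := ((scan_none_iff _ p none).mp hscan3).2 q hq
          simp at this
          by_cases h1 : q.1 = k1
          · exact Or.inl h1
          · exact Or.inr (this h1)
        have hsub : D.keys ⊆ [k1, k2] := by
          intro k hk
          obtain ⟨q, hq, rfl⟩ := (D_mem_keys p k).mp hk
          rcases hall q hq with h | h <;> simp [h]
        have hklen : D.keys.length ≤ 2 := by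
          have := ((D_nodup p).subperm hsub).length_le
          simpa using this
        have hB : (if D.size < 3 then (-1 : Int)
            else
              let vals := D.values
              let m1 := (PySem.List.max? vals (fun v => v)).getD 0
              let vals := (PySem.List.remove? vals m1).getD []
              let m2 := (PySem.List.max? vals (fun v => v)).getD 0
              let vals := (PySem.List.remove? vals m2).getD []
              let m3 := (PySem.List.max? vals (fun v => v)).getD 0
              m1 + m2 + m3) = -1 := by
          rw [if_pos (by rw [size_eq_keys_length]; omega)]
        rw [hB]
      | some s3 =>
        obtain ⟨v3, i3, k3⟩ := s3
        have hproj3 := tri_proj (fun a => decide (a ≠ k1) && decide (a ≠ k2)) E none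
        rw [htm, hsnd] at hproj3
        have hscan3 : p.foldl (scanStep (fun a => decide (a ≠ k1) && decide (a ≠ k2))) none
            = some (v3, k3) := by
          simpa [projTri] using hproj3.symm
        have hmem3p : (k3, v3) ∈ p ∧ k3 ≠ k1 ∧ k3 ≠ k2 := by
          rcases scan_mem _ p none v3 k3 hscan3 with h | h
          · cases h
          · refine ⟨h.1, ?_⟩
            have := h.2
            simp at this
            exact this
        have hdom3 : ∀ q ∈ p, q.1 ≠ k1 → q.1 ≠ k2 → q.2 ≤ v3 := by
          intro q hq h1 h2
          exact (scan_max _ p none v3 k3 hscan3).1 q hq (by simp [h1, h2])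
        -- dict values at the three keys
        have hg1 : D.get? k1 = some v1 := by
          obtain ⟨g, hg, hvg⟩ := D_some_of p k1 v1 hmem1p
          have hgle : g ≤ v1 := hdom1 (k1, g) (D_get_mem p k1 g hg).1
          have hgv : g = v1 := le_antisymm hgle hvg
          rw [hgv] at hg
          exact hg
        have hg2 : D.get? k2 = some v2 := by
          obtain ⟨g, hg, hvg⟩ := D_some_of p k2 v2 hmem2p.1
          have hgle : g ≤ v2 := hdom2 (k2, g) (D_get_mem p k2 g hg).1 hmem2p.2
          have hgv : g = v2 := le_antisymm hgle hvg
          rw [hgv] at hg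
          exact hg
        have hg3 : D.get? k3 = some v3 := by
          obtain ⟨g, hg, hvg⟩ := D_some_of p k3 v3 hmem3p.1
          have hgle : g ≤ v3 := hdom3 (k3, g) (D_get_mem p k3 g hg).1 hmem3p.2.1 hmem3p.2.2
          have hgv : g = v3 := le_antisymm hgle hvg
          rw [hgv] at hg
          exact hg
        have hNod : D.keys.Nodup := D_nodup p
        have hk1K : k1 ∈ D.keys := (D_mem_keys p k1).mpr ⟨(k1, v1), hmem1p, rfl⟩
        have hk2K : k2 ∈ D.keys := (D_mem_keys p k2).mpr ⟨(k2, v2), hmem2p.1, rfl⟩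
        have hk3K : k3 ∈ D.keys := (D_mem_keys p k3).mpr ⟨(k3, v3), hmem3p.1, rfl⟩
        have hk2K2 : k2 ∈ D.keys.erase k1 := hNod.mem_erase_iff.mpr ⟨hmem2p.2, hk2K⟩
        have hk3K3 : k3 ∈ (D.keys.erase k1).erase k2 :=
          (hNod.erase k1).mem_erase_iff.mpr ⟨hmem3p.2.2, hNod.mem_erase_iff.mpr ⟨hmem3p.2.1, hk3K⟩⟩
        have hlen3 : 3 ≤ D.keys.length := by
          have l3 := List.length_pos_of_mem hk3K3
          rw [List.length_erase_of_mem hk2K2, List.length_erase_of_mem hk1K] at l3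
          omega
        -- B takes the else branch
        rw [if_neg (by rw [size_eq_keys_length]; omega)]
        -- values as per-key maxima
        have hvals : D.values = D.keys.map (fun k => D.getD k 0) :=
          PySem.Dict.values_eq_map_keys D hNod 0
        have hvmem : ∀ w ∈ D.values, ∃ k, D.get? k = some w := fun w hw => (D_mem_values p w).mp hw
        have hvin : ∀ k g, D.get? k = some g → g ∈ D.values := by
          intro k g hg
          exact (D_mem_values p g).mpr ⟨k, hg⟩
        -- stage 1
        have hm1 : PySem.List.max? D.values (fun v => v) = some v1 := by
          apply max_eq_of _ _ (hvin k1 v1 hg1)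
          intro w hw
          obtain ⟨k, hk⟩ := hvmem w hw
          exact hdom1 (k, w) (D_get_mem p k w hk).1
        have hv1mem : v1 ∈ D.values := hvin k1 v1 hg1
        have hrm1 : PySem.List.remove? D.values v1 = some (D.values.erase v1) :=
          PySem.List.remove?_eq_some_erase _ _ hv1mem
        -- vals after first removal is (keys.erase k1).map getD, up to permutation
        have hKperm : D.keys.Perm (k1 :: D.keys.erase k1) := List.perm_cons_erase hk1K
        have hvperm : D.values.Perm (v1 :: (D.keys.erase k1).map (fun k => D.getD k 0)) := by
          have := hKperm.map (fun k => D.getD k 0)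
          rw [← hvals, List.map_cons] at this
          rw [PySem.Dict.getD_of_get?_eq_some D 0 hg1] at this
          exact this
        have hperm2 : (D.values.erase v1).Perm ((D.keys.erase k1).map (fun k => D.getD k 0)) :=
          (((List.perm_cons_erase hv1mem).symm.trans hvperm)).cons_inv
        -- elements of the second pool
        have hpool2 : ∀ w ∈ D.values.erase v1, ∃ k, k ≠ k1 ∧ D.get? k = some w := by
          intro w hw
          rw [hperm2.mem_iff, List.mem_map] at hw
          obtain ⟨k, hkmem, rfl⟩ := hw
          obtain ⟨hkne, hkK⟩ := hNod.mem_erase_iff.mp hkmem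
          obtain ⟨g, hg⟩ := get?_some_of_mem_keys D k hkK
          rw [PySem.Dict.getD_of_get?_eq_some D 0 hg]
          exact ⟨k, hkne, hg⟩
        have hv2mem : v2 ∈ D.values.erase v1 := by
          rw [hperm2.mem_iff, List.mem_map]
          exact ⟨k2, hk2K2, PySem.Dict.getD_of_get?_eq_some D 0 hg2⟩
        have hm2 : PySem.List.max? (D.values.erase v1) (fun v => v) = some v2 := by
          apply max_eq_of _ _ hv2mem
          intro w hw
          obtain ⟨k, hkne, hk⟩ := hpool2 w hw
          exact hdom2 (k, w) (D_get_mem p k w hk).1 hkne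
        have hrm2 : PySem.List.remove? (D.values.erase v1) v2
            = some ((D.values.erase v1).erase v2) :=
          PySem.List.remove?_eq_some_erase _ _ hv2mem
        -- third pool
        have hK2perm : (D.keys.erase k1).Perm (k2 :: (D.keys.erase k1).erase k2) :=
          List.perm_cons_erase hk2K2
        have hvperm2 : (D.values.erase v1).Perm
            (v2 :: ((D.keys.erase k1).erase k2).map (fun k => D.getD k 0)) := by
          have := hK2perm.map (fun k => D.getD k 0)
          rw [List.map_cons, PySem.Dict.getD_of_get?_eq_some D 0 hg2] at this
          exact hperm2.trans this
        have hperm3 : ((D.values.erase v1).erase v2).Perm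
            (((D.keys.erase k1).erase k2).map (fun k => D.getD k 0)) :=
          ((List.perm_cons_erase hv2mem).symm.trans hvperm2).cons_inv
        have hpool3 : ∀ w ∈ (D.values.erase v1).erase v2,
            ∃ k, k ≠ k1 ∧ k ≠ k2 ∧ D.get? k = some w := by
          intro w hw
          rw [hperm3.mem_iff, List.mem_map] at hw
          obtain ⟨k, hkmem, rfl⟩ := hw
          obtain ⟨hkne2, hkmem1⟩ := (hNod.erase k1).mem_erase_iff.mp hkmem
          obtain ⟨hkne1, hkK⟩ := hNod.mem_erase_iff.mp hkmem1
          obtain ⟨g, hg⟩ := get?_some_of_mem_keys D k hkK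
          rw [PySem.Dict.getD_of_get?_eq_some D 0 hg]
          exact ⟨k, hkne1, hkne2, hg⟩
        have hv3mem : v3 ∈ (D.values.erase v1).erase v2 := by
          rw [hperm3.mem_iff, List.mem_map]
          exact ⟨k3, hk3K3, PySem.Dict.getD_of_get?_eq_some D 0 hg3⟩
        have hm3 : PySem.List.max? ((D.values.erase v1).erase v2) (fun v => v) = some v3 := by
          apply max_eq_of _ _ hv3mem
          intro w hw
          obtain ⟨k, hkne1, hkne2, hk⟩ := hpool3 w hw
          exact hdom3 (k, w) (D_get_mem p k w hk).1 hkne1 hkne2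
        show v1 + v2 + v3 = _
        simp only [hm1, Option.getD_some, hrm1, hm2, hrm2, hm3]
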